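-- pv_equiv track=rewrite | github.com/mizuP0905/SoftQuantum | SoftQuantum/qasm_gui.py | _to_tk_index
-- ===== SOURCE A (Python) =====
-- def _to_tk_index(text: str, idx: int) -> str:
--     lines = text.splitlines(keepends=True)
--     row = 1
--     remaining = idx
--     for line in lines:
--         if remaining <= len(line) - 1:
--             return f"{row}.{remaining}"
--         remaining -= len(line)
--         row += 1
--     return f"{row}.0"
-- ===== SOURCE B (Python) =====
-- import bisect
--
-- def _to_tk_index(text: str, idx: int) -> str:
--     lines = text.splitlines(keepends=True)
--     ends = []
--     total = 0
--     for line in lines: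
--         total += len(line)
--         ends.append(total)
--     row = bisect.bisect_right(ends, idx)
--     if row == len(lines):
--         return f"{len(lines) + 1}.0"
--     start = ends[row - 1] if row > 0 else 0
--     return f"{row + 1}.{idx - start}"
-- ===== Notes on version B (the rewrite author's own statement) =====
-- stated objective: alternative
-- what changed: Replaces A's linear scan that subtracts each line length from the index with a cumulative line-end table plus bisect_right binary search that locates the row directly.
import Mathlib
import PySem

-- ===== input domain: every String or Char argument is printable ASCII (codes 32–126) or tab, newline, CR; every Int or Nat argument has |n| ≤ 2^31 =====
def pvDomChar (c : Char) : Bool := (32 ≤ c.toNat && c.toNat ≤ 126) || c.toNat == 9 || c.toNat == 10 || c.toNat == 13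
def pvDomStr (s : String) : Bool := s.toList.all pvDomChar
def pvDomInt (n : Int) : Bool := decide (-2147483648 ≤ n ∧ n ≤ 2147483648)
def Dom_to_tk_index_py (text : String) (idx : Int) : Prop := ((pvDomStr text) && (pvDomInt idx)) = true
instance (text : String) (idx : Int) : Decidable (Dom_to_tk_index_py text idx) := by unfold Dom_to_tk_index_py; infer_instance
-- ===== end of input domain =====

-- B replaces A's linear scan-and-subtract loop with a cumulative line-length table plus
-- binary search (bisect_right); objective: alternative algorithm (index table + bisect).

-- shared helper: text.splitlines(keepends=True), hand-ported; exact on the Dom's line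
-- breaks (\n, \r, \r\n are Python's only line breaks among tab/CR/LF/printable ASCII)
def splitKeep : List Char → List (List Char)
  | [] => []
  | '\r' :: '\n' :: rest => ['\r', '\n'] :: splitKeep rest
  | '\r' :: rest => ['\r'] :: splitKeep rest
  | '\n' :: rest => ['\n'] :: splitKeep rest
  | c :: rest =>
    match splitKeep rest with
    | [] => [[c]]
    | l :: ls => (c :: l) :: ls

-- ===== PORT A =====
-- the for-loop of A, over (lines, row, remaining)
def aLoop : List (List Char) → Int → Int → String
  | [], row, _ => PySem.Int.toStr row ++ ".0"
  | line :: restL, row, remaining =>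
    if remaining ≤ (line.length : Int) - 1 then
      PySem.Int.toStr row ++ "." ++ PySem.Int.toStr remaining
    else
      aLoop restL (row + 1) (remaining - (line.length : Int))

def to_tk_index_py (text : String) (idx : Int) : String :=
  aLoop (splitKeep text.toList) 1 idx

-- ===== PORT B =====
-- the ends-building loop of B (running total, appending cumulative ends)
def buildEnds : List (List Char) → Int → List Int
  | [], _ => []
  | line :: restL, total => (total + (line.length : Int)) :: buildEnds restL (total + (line.length : Int))

-- bisect.bisect_right on a sorted list = number of leading elements ≤ x
def bisectRight (xs : List Int) (x : Int) : Nat :=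
  (xs.takeWhile (fun e => decide (e ≤ x))).length

def to_tk_index_py_alt (text : String) (idx : Int) : String :=
  let lines := splitKeep text.toList
  let ends := buildEnds lines 0
  let row := bisectRight ends idx
  if row = lines.length then
    PySem.Int.toStr ((lines.length : Int) + 1) ++ ".0"
  else
    -- ends[row-1] is always in range when row > 0 (row ≤ len(ends)); getD's default is never used
    let start := if row > 0 then ends.getD (row - 1) 0 else 0
    PySem.Int.toStr ((row : Int) + 1) ++ "." ++ PySem.Int.toStr (idx - start)

-- ===== PRECONDITION & SPEC =====
def Spec_to_tk_index_py (text : String) (idx : Int) (out : String) : Prop := out = to_tk_index_py_alt text idx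
instance (text : String) (idx : Int) (out : String) : Decidable (Spec_to_tk_index_py text idx out) := by unfold Spec_to_tk_index_py; infer_instance

-- ===== CLAIM (what is proved, stated in full; the proofs are below) =====
def Claim_equal_to_tk_index_py : Prop := ∀ (text : String) (idx : Int), Dom_to_tk_index_py text idx → Spec_to_tk_index_py text idx (to_tk_index_py text idx)

-- ===== LEMMAS AND PROOFS =====

theorem buildEnds_shift (ls : List (List Char)) (t : Int) :
    buildEnds ls t = (buildEnds ls 0).map (fun e => e + t) := by
  induction ls generalizing t with
  | nil => simp [buildEnds]
  | cons l r ih =>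
    simp only [buildEnds, List.map_cons, ih (t + _), ih ((0:Int) + _), List.map_map]
    congr 1
    · ring
    · congr 1; funext e; simp [Function.comp]; ring

theorem buildEnds_cons0 (l : List Char) (rest : List (List Char)) :
    buildEnds (l :: rest) 0 = ((l.length : Int)) :: (buildEnds rest 0).map (fun e => e + (l.length : Int)) := by
  simp only [buildEnds, zero_add]
  rw [buildEnds_shift]

theorem length_buildEnds (ls : List (List Char)) (t : Int) : (buildEnds ls t).length = ls.length := by
  induction ls generalizing t with
  | nil => rfl
  | cons l r ih => simp [buildEnds, ih]

theorem bisectRight_le (xs : List Int) (x : Int) : bisectRight xs x ≤ xs.length :=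
  (List.takeWhile_sublist _).length_le

def gcore (lines : List (List Char)) (idx : Int) (k : Int) : String :=
  let ends := buildEnds lines 0
  let row := bisectRight ends idx
  if row = lines.length then
    PySem.Int.toStr (k + (lines.length : Int) + 1) ++ ".0"
  else
    let start := if row > 0 then ends.getD (row - 1) 0 else 0
    PySem.Int.toStr (k + (row : Int) + 1) ++ "." ++ PySem.Int.toStr (idx - start)

theorem gcore_nil (idx k : Int) : gcore [] idx k = PySem.Int.toStr (k + 1) ++ ".0" := by
  simp [gcore, bisectRight, buildEnds]

theorem gcore_cons_lt (l : List Char) (rest : List (List Char)) (idx k : Int)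
    (h : idx ≤ (l.length : Int) - 1) :
    gcore (l :: rest) idx k = PySem.Int.toStr (k + 1) ++ "." ++ PySem.Int.toStr idx := by
  have hx : ¬ ((l.length : Int) ≤ idx) := by omega
  have hb : bisectRight (buildEnds (l :: rest) 0) idx = 0 := by
    simp [bisectRight, buildEnds_cons0, hx]
  simp [gcore, hb]

theorem gcore_cons_ge (l : List Char) (rest : List (List Char)) (idx k : Int)
    (h : (l.length : Int) ≤ idx) :
    gcore (l :: rest) idx k = gcore rest (idx - (l.length : Int)) (k + 1) := by
  have hpred : (fun e => decide (e ≤ idx)) ∘ (fun e : Int => e + (l.length : Int))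
      = fun e : Int => decide (e ≤ idx - (l.length : Int)) := by
    funext e; simp [Function.comp]; omega
  have hb : bisectRight (buildEnds (l :: rest) 0) idx
      = bisectRight (buildEnds rest 0) (idx - (l.length : Int)) + 1 := by
    simp only [bisectRight, buildEnds_cons0, List.takeWhile_cons, h, decide_true, if_true,
      List.takeWhile_map, hpred, List.length_cons, List.length_map]
  set r' := bisectRight (buildEnds rest 0) (idx - (l.length : Int)) with hr'
  have hr'le : r' ≤ rest.length := by
    have := bisectRight_le (buildEnds rest 0) (idx - (l.length : Int))
    rwa [length_buildEnds] at this

  by_cases he : r' = rest.length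
  · simp only [gcore, hb, he, List.length_cons, ← hr']
    rw [if_pos trivial, if_pos trivial]
    congr 2
    push_cast; ring
  · have hne : ¬ (r' + 1 = rest.length + 1) := by omega
    simp only [gcore, hb, ← hr', List.length_cons]
    rw [if_neg hne, if_neg he]
    have hget : (buildEnds (l :: rest) 0).getD (r' + 1 - 1) 0
        = (l.length : Int) + (if r' > 0 then (buildEnds rest 0).getD (r' - 1) 0 else 0) := by
      rw [buildEnds_cons0]
      match hr : r' with
      | 0 => simp
      | Nat.succ j =>
        have hj : j < (buildEnds rest 0).length := by
          rw [length_buildEnds]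
          omega
        simp only [List.getD_cons_succ, Nat.succ_sub_one, gt_iff_lt, Nat.succ_pos, if_pos]
        rw [List.getD_eq_getElem?_getD, List.getD_eq_getElem?_getD, List.getElem?_map,
          List.getElem?_eq_getElem hj]
        simp [add_comm]
    rw [if_pos (by omega : r' + 1 > 0), hget]
    congr 2
    · push_cast
      ring
    · ring

theorem aLoop_eq_gcore (lines : List (List Char)) : ∀ (idx k : Int),
    aLoop lines (k + 1) idx = gcore lines idx k := by
  induction lines with
  | nil =>
    intro idx k
    rw [gcore_nil]
    rfl
  | cons l rest ih =>
    intro idx k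
    by_cases h : idx ≤ (l.length : Int) - 1
    · rw [gcore_cons_lt _ _ _ _ h]
      simp [aLoop, h]
    · rw [gcore_cons_ge _ _ _ _ (by omega), ← ih (idx - (l.length : Int)) (k + 1)]
      simp [aLoop, h]

-- ===== VERDICT (by name: the statement is the Claim_ definition above) =====
theorem to_tk_index_py_spec : Claim_equal_to_tk_index_py := by
  intro text idx _
  unfold Spec_to_tk_index_py to_tk_index_py to_tk_index_py_alt
  rw [show (1 : Int) = 0 + 1 by ring, aLoop_eq_gcore]
  simp only [gcore, zero_add]
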